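-- pv_equiv track=rewrite | github.com/hikkishi/ai-project | fuck-ai-project/learning_system.py | _categorize_input
-- ===== SOURCE A (Python) =====
-- def _categorize_input(text):
--     """Categorize input text"""
--     text_lower = text.lower()
--
--     # Check for question words
--     question_words = ["what", "how", "why", "when", "where", "who", "which"]
--     if any(word in text_lower for word in question_words):
--         return "question"
--
--     # Check for greetings
--     greeting_words = ["hello", "hi", "hey", "greetings"]
--     if any(word in text_lower for word in greeting_words):
--         return "greeting"
--
--     # Check for goodbyes
--     goodbye_words = ["bye", "goodbye", "see you", "farewell"]
--     if any(word in text_lower for word in goodbye_words):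
--         return "goodbye"
--
--     # Check for compliments
--     compliment_words = ["good", "great", "awesome", "wonderful", "amazing"]
--     if any(word in text_lower for word in compliment_words):
--         return "compliment"
--
--     # Check for complaints
--     complaint_words = ["bad", "terrible", "awful", "horrible"]
--     if any(word in text_lower for word in complaint_words):
--         return "complaint"
--
--     return "general"
-- ===== SOURCE B (Python) =====
-- # Text-driven scan: walk the lowered text once position by position, matching
-- # keywords by startswith and keeping the best (lowest) category priority seen.
--
-- _PRIORITY = {
--     "what": 0, "how": 0, "why": 0, "when": 0, "where": 0, "who": 0, "which": 0,
--     "hello": 1, "hi": 1, "hey": 1, "greetings": 1,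
--     "bye": 2, "goodbye": 2, "see you": 2, "farewell": 2,
--     "good": 3, "great": 3, "awesome": 3, "wonderful": 3, "amazing": 3,
--     "bad": 4, "terrible": 4, "awful": 4, "horrible": 4,
-- }
--
-- _LABELS = ["question", "greeting", "goodbye", "compliment", "complaint", "general"]
--
--
-- def _categorize_input(text):
--     tl = text.lower()
--     best = 5
--     for i in range(len(tl)):
--         for kw, cat in _PRIORITY.items():
--             if cat < best and tl.startswith(kw, i):
--                 best = cat
--     return _LABELS[best]
-- ===== Notes on version B (the rewrite author's own statement) =====
-- stated objective: alternative
-- what changed: Replaces five category-ordered any-substring checks by a single text-driven scan: walk the lowered text position by position, match keywords with startswith against a keyword-to-priority dict, and keep the minimum priority seen; the label is looked up from that minimum.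
import Mathlib
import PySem

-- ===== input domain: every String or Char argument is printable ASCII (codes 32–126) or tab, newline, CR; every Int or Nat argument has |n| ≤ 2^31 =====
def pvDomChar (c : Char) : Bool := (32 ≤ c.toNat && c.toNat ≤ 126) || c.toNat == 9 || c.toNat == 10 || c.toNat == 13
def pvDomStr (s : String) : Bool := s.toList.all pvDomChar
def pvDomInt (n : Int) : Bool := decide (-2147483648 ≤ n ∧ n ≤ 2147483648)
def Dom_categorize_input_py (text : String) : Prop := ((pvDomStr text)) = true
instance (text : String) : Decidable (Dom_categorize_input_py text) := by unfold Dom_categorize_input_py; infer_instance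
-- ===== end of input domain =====

-- B replaces A's category-ordered any-substring checks by one text-driven scan that keeps
-- the minimum keyword priority matched by startswith at each position (alternative; same cost).

-- ===== PORT A =====
def categorize_input_py (text : String) : String :=
  let text_lower := PySem.Str.lower text
  let question_words := ["what", "how", "why", "when", "where", "who", "which"]
  if question_words.any (fun word => PySem.Str.isIn word text_lower) then "question"
  else
    let greeting_words := ["hello", "hi", "hey", "greetings"]
    if greeting_words.any (fun word => PySem.Str.isIn word text_lower) then "greeting"
    else
      let goodbye_words := ["bye", "goodbye", "see you", "farewell"]
      if goodbye_words.any (fun word => PySem.Str.isIn word text_lower) then "goodbye"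
      else
        let compliment_words := ["good", "great", "awesome", "wonderful", "amazing"]
        if compliment_words.any (fun word => PySem.Str.isIn word text_lower) then "compliment"
        else
          let complaint_words := ["bad", "terrible", "awful", "horrible"]
          if complaint_words.any (fun word => PySem.Str.isIn word text_lower) then "complaint"
          else "general"

-- ===== PORT B =====
-- the _PRIORITY dict of Source B, in insertion order (keyword, priority)
def pvPriority : List (List Char × Nat) :=
  [("what".toList, 0), ("how".toList, 0), ("why".toList, 0), ("when".toList, 0),
   ("where".toList, 0), ("who".toList, 0), ("which".toList, 0),
   ("hello".toList, 1), ("hi".toList, 1), ("hey".toList, 1), ("greetings".toList, 1),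
   ("bye".toList, 2), ("goodbye".toList, 2), ("see you".toList, 2), ("farewell".toList, 2),
   ("good".toList, 3), ("great".toList, 3), ("awesome".toList, 3), ("wonderful".toList, 3),
   ("amazing".toList, 3),
   ("bad".toList, 4), ("terrible".toList, 4), ("awful".toList, 4), ("horrible".toList, 4)]

def pvLabels : List String :=
  ["question", "greeting", "goodbye", "compliment", "complaint", "general"]

-- the inner loop over _PRIORITY.items(): tl.startswith(kw, i) is a prefix test on tl.drop i
def pvStep (tl : List Char) (best : Nat) (i : Nat) : Nat :=
  pvPriority.foldl
    (fun b kv => if kv.2 < b && PySem.Chars.startswith (tl.drop i) kv.1 then kv.2 else b) best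

def categorize_input_py_alt (text : String) : String :=
  let tl := (PySem.Str.lower text).toList
  let best := (List.range tl.length).foldl (pvStep tl) 5
  pvLabels.getD best "general"

-- ===== PRECONDITION & SPEC =====
def Spec_categorize_input_py (text : String) (out : String) : Prop := out = categorize_input_py_alt text
instance (text : String) (out : String) : Decidable (Spec_categorize_input_py text out) := by unfold Spec_categorize_input_py; infer_instance

-- ===== CLAIM (what is proved, stated in full; the proofs are below) =====
def Claim_equal_categorize_input_py : Prop := ∀ (text : String), Dom_categorize_input_py text → Spec_categorize_input_py text (categorize_input_py text)

-- ===== LEMMAS AND PROOFS =====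

-- one hit of the scan: some keyword of category c matches at some position of tl
def pvM (tl : List Char) (c : Nat) : Prop :=
  ∃ i ∈ List.range tl.length, ∃ kv, kv ∈ pvPriority ∧ kv.2 = c ∧ kv.1 <+: tl.drop i

-- characterization of the inner foldl (min over matching priorities, general table)
lemma pv_inner_charac (tl : List Char) (i : Nat) (T : List (List Char × Nat)) (b : Nat) :
    (T.foldl (fun b kv => if kv.2 < b && PySem.Chars.startswith (tl.drop i) kv.1 then kv.2 else b) b) ≤ b ∧
    ((T.foldl (fun b kv => if kv.2 < b && PySem.Chars.startswith (tl.drop i) kv.1 then kv.2 else b) b) = b ∨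
      ∃ kv, kv ∈ T ∧ kv.2 = (T.foldl (fun b kv => if kv.2 < b && PySem.Chars.startswith (tl.drop i) kv.1 then kv.2 else b) b) ∧ kv.1 <+: tl.drop i) ∧
    (∀ kv, kv ∈ T → kv.1 <+: tl.drop i →
      (T.foldl (fun b kv => if kv.2 < b && PySem.Chars.startswith (tl.drop i) kv.1 then kv.2 else b) b) ≤ kv.2) := by
  induction T generalizing b with
  | nil => simp
  | cons kv0 T ih =>
    simp only [List.foldl_cons]
    by_cases h : (kv0.2 < b && PySem.Chars.startswith (tl.drop i) kv0.1) = true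
    · rw [if_pos h]
      rw [Bool.and_eq_true] at h
      have hlt : kv0.2 < b := of_decide_eq_true h.1
      have hsw : kv0.1 <+: tl.drop i := (PySem.Chars.startswith_iff _ _).1 h.2
      obtain ⟨hle, hhit, hmin⟩ := ih kv0.2
      refine ⟨le_trans hle (le_of_lt hlt), ?_, ?_⟩
      · rcases hhit with h' | ⟨kv, hmem, hc, hp⟩
        · exact Or.inr ⟨kv0, List.mem_cons_self, h'.symm, hsw⟩
        · exact Or.inr ⟨kv, List.mem_cons_of_mem _ hmem, hc, hp⟩
      · intro kv hmem hp
        rcases List.mem_cons.1 hmem with heq | hmem'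
        · rw [heq]; exact hle
        · exact hmin kv hmem' hp
    · rw [if_neg h]
      obtain ⟨hle, hhit, hmin⟩ := ih b
      refine ⟨hle, ?_, ?_⟩
      · rcases hhit with h' | ⟨kv, hmem, hc, hp⟩
        · exact Or.inl h'
        · exact Or.inr ⟨kv, List.mem_cons_of_mem _ hmem, hc, hp⟩
      · intro kv hmem hp
        rcases List.mem_cons.1 hmem with heq | hmem'
        · -- kv0 matches but the guard failed, so b ≤ kv0.2
          rw [heq]
          by_cases hb : kv0.2 < b
          · exfalso
            apply h
            rw [Bool.and_eq_true]
            refine ⟨decide_eq_true hb, (PySem.Chars.startswith_iff _ _).2 ?_⟩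
            rw [← heq]; exact hp
          · exact le_trans hle (Nat.le_of_not_lt hb)
        · exact hmin kv hmem' hp

-- characterization of the outer foldl over the position list
lemma pv_outer_charac (tl : List Char) (l : List Nat) (b : Nat) :
    (l.foldl (pvStep tl) b) ≤ b ∧
    ((l.foldl (pvStep tl) b) = b ∨
      ∃ i ∈ l, ∃ kv, kv ∈ pvPriority ∧ kv.2 = (l.foldl (pvStep tl) b) ∧ kv.1 <+: tl.drop i) ∧
    (∀ i ∈ l, ∀ kv, kv ∈ pvPriority → kv.1 <+: tl.drop i → (l.foldl (pvStep tl) b) ≤ kv.2) := by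
  induction l generalizing b with
  | nil => simp
  | cons i0 l ih =>
    simp only [List.foldl_cons]
    obtain ⟨hle1, hhit1, hmin1⟩ := pv_inner_charac tl i0 pvPriority b
    obtain ⟨hle, hhit, hmin⟩ := ih (pvStep tl b i0)
    have hstep : pvStep tl b i0 =
        pvPriority.foldl (fun b kv => if kv.2 < b && PySem.Chars.startswith (tl.drop i0) kv.1 then kv.2 else b) b := rfl
    refine ⟨le_trans hle (hstep ▸ hle1), ?_, ?_⟩
    · rcases hhit with h' | ⟨i, hi, kv, hmem, hc, hp⟩
      · rw [h', hstep]
        rcases hhit1 with h'' | ⟨kv, hmem, hc, hp⟩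
        · exact Or.inl h''
        · exact Or.inr ⟨i0, List.mem_cons_self, kv, hmem, hc, hp⟩
      · exact Or.inr ⟨i, List.mem_cons_of_mem _ hi, kv, hmem, hc, hp⟩
    · intro i hi kv hmem hp
      rcases List.mem_cons.1 hi with heq | hi'
      · refine le_trans hle (hstep ▸ hmin1 kv hmem ?_)
        rw [← heq]; exact hp
      · exact hmin i hi' kv hmem hp

-- a nonempty keyword occurring anywhere occurs at a position below the length
lemma pv_exists_pos (tl kw : List Char) (hkw : kw ≠ []) :
    (∃ i ∈ List.range tl.length, kw <+: tl.drop i) ↔ PySem.Chars.isIn kw tl = true := by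
  rw [← PySem.Chars.exists_prefix_drop_iff_isIn]
  constructor
  · rintro ⟨i, _, hp⟩; exact ⟨i, hp⟩
  · rintro ⟨j, hp⟩
    by_cases hj : j < tl.length
    · exact ⟨j, List.mem_range.2 hj, hp⟩
    · exfalso
      have hd : tl.drop j = [] := List.drop_eq_nil_of_le (Nat.le_of_not_lt hj)
      rw [hd] at hp
      exact hkw (List.prefix_nil.1 hp)

-- pvM for each concrete category is A's any-substring condition
lemma pvM_iff (tl : List Char) (c : Nat) (words : List String)
    (hws : pvPriority.filter (fun kv => kv.2 == c) = words.map (fun w => (w.toList, c)))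
    (hne : ∀ w ∈ words, w.toList ≠ []) :
    pvM tl c ↔ words.any (fun w => PySem.Chars.isIn w.toList tl) = true := by
  unfold pvM
  constructor
  · rintro ⟨i, hi, kv, hmem, hc, hp⟩
    have hfil : kv ∈ pvPriority.filter (fun kv => kv.2 == c) :=
      List.mem_filter.2 ⟨hmem, by simp [hc]⟩
    rw [hws] at hfil
    obtain ⟨w, hw, hkv⟩ := List.mem_map.1 hfil
    refine List.any_eq_true.2 ⟨w, hw, ?_⟩
    exact (pv_exists_pos tl w.toList (hne w hw)).1 ⟨i, hi, by rw [← hkv] at hp; exact hp⟩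
  · intro h
    obtain ⟨w, hw, hin⟩ := List.any_eq_true.1 h
    obtain ⟨i, hi, hp⟩ := (pv_exists_pos tl w.toList (hne w hw)).2 hin
    have hfil : (w.toList, c) ∈ pvPriority.filter (fun kv => kv.2 == c) := by
      rw [hws]; exact List.mem_map.2 ⟨w, hw, rfl⟩
    exact ⟨i, hi, (w.toList, c), (List.mem_filter.1 hfil).1, rfl, hp⟩

-- the five categories, phrased on the String side exactly as port A tests them
lemma pvMs0 (s : String) :
    pvM s.toList 0 ↔ (["what", "how", "why", "when", "where", "who", "which"].any (fun word => PySem.Str.isIn word s)) = true := by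
  rw [pvM_iff s.toList 0 ["what", "how", "why", "when", "where", "who", "which"] (by decide) (by decide)]
  simp only [PySem.Str.isIn_eq]
lemma pvMs1 (s : String) :
    pvM s.toList 1 ↔ (["hello", "hi", "hey", "greetings"].any (fun word => PySem.Str.isIn word s)) = true := by
  rw [pvM_iff s.toList 1 ["hello", "hi", "hey", "greetings"] (by decide) (by decide)]
  simp only [PySem.Str.isIn_eq]
lemma pvMs2 (s : String) :
    pvM s.toList 2 ↔ (["bye", "goodbye", "see you", "farewell"].any (fun word => PySem.Str.isIn word s)) = true := by
  rw [pvM_iff s.toList 2 ["bye", "goodbye", "see you", "farewell"] (by decide) (by decide)]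
  simp only [PySem.Str.isIn_eq]
lemma pvMs3 (s : String) :
    pvM s.toList 3 ↔ (["good", "great", "awesome", "wonderful", "amazing"].any (fun word => PySem.Str.isIn word s)) = true := by
  rw [pvM_iff s.toList 3 ["good", "great", "awesome", "wonderful", "amazing"] (by decide) (by decide)]
  simp only [PySem.Str.isIn_eq]
lemma pvMs4 (s : String) :
    pvM s.toList 4 ↔ (["bad", "terrible", "awful", "horrible"].any (fun word => PySem.Str.isIn word s)) = true := by
  rw [pvM_iff s.toList 4 ["bad", "terrible", "awful", "horrible"] (by decide) (by decide)]
  simp only [PySem.Str.isIn_eq]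

-- every priority in the table is below 5
lemma pv_table_lt5 : ∀ kv ∈ pvPriority, kv.2 < 5 := by decide

-- ===== VERDICT =====
theorem categorize_input_py_spec : Claim_equal_categorize_input_py := by
  intro text _
  unfold Spec_categorize_input_py categorize_input_py categorize_input_py_alt
  dsimp only
  set s := PySem.Str.lower text with hs
  set tl := s.toList with htl
  set r := (List.range tl.length).foldl (pvStep tl) 5 with hr
  obtain ⟨hle, hhit, hmin⟩ := pv_outer_charac tl (List.range tl.length) 5
  rw [← hr] at hle hhit hmin
  have hMmin : ∀ c, pvM tl c → r ≤ c := by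
    rintro c ⟨i, hi, kv, hmem, hc, hp⟩
    exact hc ▸ hmin i hi kv hmem hp
  have hrM : r = 5 ∨ pvM tl r := by
    rcases hhit with h | ⟨i, hi, kv, hmem, hc, hp⟩
    · exact Or.inl h
    · exact Or.inr ⟨i, hi, kv, hmem, hc, hp⟩
  split_ifs with h0 h1 h2 h3 h4
  · have hr0 : r = 0 := Nat.le_zero.1 (hMmin 0 ((pvMs0 s).2 h0))
    rw [hr0]; rfl
  · have hle1 : r ≤ 1 := hMmin 1 ((pvMs1 s).2 h1)
    have hr1 : r = 1 := by
      rcases hrM with h | hM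
      · omega
      · interval_cases r
        · exact absurd ((pvMs0 s).1 hM) h0
        · rfl
    rw [hr1]; rfl
  · have hle2 : r ≤ 2 := hMmin 2 ((pvMs2 s).2 h2)
    have hr2 : r = 2 := by
      rcases hrM with h | hM
      · omega
      · interval_cases r
        · exact absurd ((pvMs0 s).1 hM) h0
        · exact absurd ((pvMs1 s).1 hM) h1
        · rfl
    rw [hr2]; rfl
  · have hle3 : r ≤ 3 := hMmin 3 ((pvMs3 s).2 h3)
    have hr3 : r = 3 := by
      rcases hrM with h | hM
      · omega
      · interval_cases r
        · exact absurd ((pvMs0 s).1 hM) h0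
        · exact absurd ((pvMs1 s).1 hM) h1
        · exact absurd ((pvMs2 s).1 hM) h2
        · rfl
    rw [hr3]; rfl
  · have hle4 : r ≤ 4 := hMmin 4 ((pvMs4 s).2 h4)
    have hr4 : r = 4 := by
      rcases hrM with h | hM
      · omega
      · interval_cases r
        · exact absurd ((pvMs0 s).1 hM) h0
        · exact absurd ((pvMs1 s).1 hM) h1
        · exact absurd ((pvMs2 s).1 hM) h2
        · exact absurd ((pvMs3 s).1 hM) h3
        · rfl
    rw [hr4]; rfl
  · have hr5 : r = 5 := by
      rcases hrM with h | hM
      · exact h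
      · exfalso
        have h5 : r < 5 := by
          obtain ⟨i, hi, kv, hmem, hc, hp⟩ := hM
          exact hc ▸ pv_table_lt5 kv hmem
        interval_cases r
        · exact absurd ((pvMs0 s).1 hM) h0
        · exact absurd ((pvMs1 s).1 hM) h1
        · exact absurd ((pvMs2 s).1 hM) h2
        · exact absurd ((pvMs3 s).1 hM) h3
        · exact absurd ((pvMs4 s).1 hM) h4
    rw [hr5]; rfl
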